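-- pv_equiv track=rewrite | github.com/SpectralSequences/sseq | chart/python/spectralsequence_chart/messages.py | cmdstr_to_filter_list
-- ===== SOURCE A (Python) =====
-- from typing import Dict, List, Any, Tuple
--
-- def cmdstr_to_filter_list(cmd_str : str) -> List[str]:
--     # We use "__" as a standin for "." in "command filter identifiers"
--     # Just in case, convert any "__" back to "."
--     cmd_str = cmd_str.replace("__", ".") # TODO: is this a good choice?
--     result = [cmd_str]
--     idx = cmd_str.rfind(".")
--     while(idx >= 0):
--         cmd_str = cmd_str[ : idx]
--         result.append(cmd_str)
--         idx = cmd_str.rfind(".")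
--     result.append("*")
--     return result
-- ===== SOURCE B (Python) =====
-- def cmdstr_to_filter_list(cmd_str):
--     # Tokenize once instead of repeated rfind scans: the successive loop states of
--     # the original are exactly the joins of the shrinking prefix lists of parts.
--     parts = cmd_str.replace("__", ".").split(".")
--     result = []
--     while parts:
--         result.append(".".join(parts))
--         parts.pop()
--     result.append("*")
--     return result
-- ===== Notes on version B (the rewrite author's own statement) =====
-- stated objective: simpler
-- what changed: B tokenizes the command string once into its dot-separated parts and builds the result by joining the shrinking parts list (popping one part per step), instead of A's repeated rfind scans and slice truncations of the string.
import Mathlib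
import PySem

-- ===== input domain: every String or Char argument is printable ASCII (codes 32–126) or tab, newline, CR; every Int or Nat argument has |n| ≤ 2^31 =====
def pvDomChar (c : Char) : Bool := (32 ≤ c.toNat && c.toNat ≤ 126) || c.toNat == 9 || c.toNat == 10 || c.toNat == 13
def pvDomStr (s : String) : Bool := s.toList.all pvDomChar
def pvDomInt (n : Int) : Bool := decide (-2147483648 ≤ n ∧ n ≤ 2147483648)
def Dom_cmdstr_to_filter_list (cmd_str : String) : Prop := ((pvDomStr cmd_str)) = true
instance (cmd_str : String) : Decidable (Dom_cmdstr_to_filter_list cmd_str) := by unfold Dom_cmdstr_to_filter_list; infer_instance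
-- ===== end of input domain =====

-- B replaces A's repeated rfind scans and slice truncations by one split on the
-- dot separator followed by joins of the shrinking parts list (objective: simpler decomposition).

-- ===== PORT A =====

-- termination helper for the while loop: a nonnegative rfind(".") is a strict
-- in-range index, so the slice cmd_str[:idx] is strictly shorter
theorem pvRfindGoDotLt (cs : List Char) :
    ∀ k, 0 ≤ PySem.Chars.rfind.go cs ['.'] k → (PySem.Chars.rfind.go cs ['.'] k).toNat < cs.length := by
  intro k
  induction k with
  | zero =>
    simp only [PySem.Chars.rfind.go]
    split
    · rename_i h
      intro _
      have := List.IsPrefix.length_le (List.isPrefixOf_iff_prefix.mp h)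
      simpa using Nat.lt_of_lt_of_le (by norm_num) this
    · intro h; omega
  | succ j ih =>
    simp only [PySem.Chars.rfind.go]
    split
    · rename_i h
      intro _
      have hlen := List.IsPrefix.length_le (List.isPrefixOf_iff_prefix.mp h)
      simp only [List.length_drop, List.length_singleton] at hlen
      simp only [Int.toNat_natCast]
      omega
    · exact ih

-- while idx >= 0: cmd_str = cmd_str[:idx]; result.append(cmd_str); idx = cmd_str.rfind(".")
def pvAGo (cs : List Char) (acc : List String) : List String :=
  let idx := PySem.Chars.rfind cs ['.']
  if h : 0 ≤ idx then
    have hlt : (PySem.List.slice cs none (some idx)).length < cs.length := by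
      rw [PySem.List.slice_to cs h]
      have h3 : idx.toNat < cs.length := pvRfindGoDotLt cs cs.length h
      simp only [List.length_take]
      omega
    pvAGo (PySem.List.slice cs none (some idx)) (acc ++ [String.ofList (PySem.List.slice cs none (some idx))])
  else acc
termination_by cs.length

def cmdstr_to_filter_list (cmd_str : String) : List String :=
  let s := PySem.Str.replace cmd_str "__" "."
  pvAGo s.toList [s] ++ ["*"]

-- ===== PORT B =====

-- while parts: result.append(".".join(parts)); parts.pop()
def pvBGo (parts : List (List Char)) : List String :=
  if h : parts = [] then []
  else
    have : parts.dropLast.length < parts.length := by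
      have := List.length_pos_iff.mpr h
      simp only [List.length_dropLast]; omega
    String.ofList (PySem.Chars.join ['.'] parts) :: pvBGo parts.dropLast
termination_by parts.length

def cmdstr_to_filter_list_alt (cmd_str : String) : List String :=
  let parts := PySem.Chars.splitOn (PySem.Str.replace cmd_str "__" ".").toList ['.']
  pvBGo parts ++ ["*"]

-- ===== PRECONDITION & SPEC =====
def Spec_cmdstr_to_filter_list (cmd_str : String) (out : List String) : Prop := out = cmdstr_to_filter_list_alt cmd_str
instance (cmd_str : String) (out : List String) : Decidable (Spec_cmdstr_to_filter_list cmd_str out) := by unfold Spec_cmdstr_to_filter_list; infer_instance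

-- ===== CLAIM (what is proved, stated in full; the proofs are below) =====
def Claim_equal_cmdstr_to_filter_list : Prop := ∀ (cmd_str : String), Dom_cmdstr_to_filter_list cmd_str → Spec_cmdstr_to_filter_list cmd_str (cmdstr_to_filter_list cmd_str)

-- ===== LEMMAS AND PROOFS =====

-- rfind(".") = -1 when the string has no dot
theorem pvRfindGoNoDot (cs : List Char) (hnd : '.' ∉ cs) :
    ∀ k, PySem.Chars.rfind.go cs ['.'] k = -1 := by
  have key : ∀ j, ¬ (['.'].isPrefixOf (cs.drop j) = true) := by
    intro j hp
    exact hnd (List.drop_subset j cs ((List.isPrefixOf_iff_prefix.mp hp).subset (by simp)))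
  intro k
  induction k with
  | zero =>
    simp only [PySem.Chars.rfind.go]
    rw [if_neg (by simpa using key 0)]
  | succ j ih =>
    simp only [PySem.Chars.rfind.go] at ih ⊢
    rw [if_neg (key (j+1))]
    exact ih

-- rfind(".") finds the LAST dot: on as ++ '.' :: bs with dot-free bs it returns len(as)
theorem pvRfindGoLast (as bs : List Char) (hnd : '.' ∉ bs) :
    ∀ k, as.length ≤ k → PySem.Chars.rfind.go (as ++ '.' :: bs) ['.'] k = as.length := by
  have hpre : ['.'].isPrefixOf ((as ++ '.' :: bs).drop as.length) = true := by
    rw [List.drop_left' rfl]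
    simp
  have hno : ∀ j, as.length < j → ¬ (['.'].isPrefixOf ((as ++ '.' :: bs).drop j) = true) := by
    intro j hj hp
    have hm : '.' ∈ (as ++ '.' :: bs).drop j := (List.isPrefixOf_iff_prefix.mp hp).subset (by simp)
    have he : (as ++ '.' :: bs).drop j = bs.drop (j - as.length - 1) := by
      have h2 : j = (as ++ ['.']).length + (j - as.length - 1) := by simp; omega
      calc (as ++ '.' :: bs).drop j
          = ((as ++ ['.']) ++ bs).drop ((as ++ ['.']).length + (j - as.length - 1)) := by
            rw [← h2]; simp
        _ = bs.drop (j - as.length - 1) := List.drop_length_add_append _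
    rw [he] at hm
    exact hnd (List.drop_subset _ bs hm)
  intro k
  induction k with
  | zero =>
    intro hk
    have h0 : as.length = 0 := by omega
    simp only [PySem.Chars.rfind.go]
    rw [List.length_eq_zero_iff.mp h0] at hpre ⊢
    simp only [List.drop_zero, List.length_nil, List.nil_append] at hpre ⊢
    rw [if_pos hpre]
    simp
  | succ j ih =>
    intro hk
    simp only [PySem.Chars.rfind.go]
    rcases Nat.lt_or_ge as.length (j+1) with h | h
    · rw [if_neg (hno (j+1) h)]
      exact ih (by omega)
    · have hj : as.length = j + 1 := by omega
      rw [← hj, if_pos hpre]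

theorem pvRfindNoDot (cs : List Char) (hnd : '.' ∉ cs) : PySem.Chars.rfind cs ['.'] = -1 := by
  simp only [PySem.Chars.rfind]
  exact pvRfindGoNoDot cs hnd cs.length

theorem pvRfindLast (as bs : List Char) (hnd : '.' ∉ bs) :
    PySem.Chars.rfind (as ++ '.' :: bs) ['.'] = as.length := by
  simp only [PySem.Chars.rfind]
  exact pvRfindGoLast as bs hnd _ (by simp)

-- a dot-free list splits into itself
theorem pvSplitOnPFree (bs : List Char) (hnd : '.' ∉ bs) :
    List.splitOnP (fun x => x == '.') bs = [bs] := by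
  refine List.splitOnP_eq_single _ _ ?_
  intro x hx
  simp only [beq_iff_eq]
  rintro rfl
  exact hnd hx

theorem pvSplitOnNoDot (cs : List Char) (hnd : '.' ∉ cs) : cs.splitOn '.' = [cs] := by
  simp only [List.splitOn]
  exact pvSplitOnPFree cs hnd

-- splitting at the LAST dot appends the final dot-free segment
theorem pvSplitOnLast (as bs : List Char) (hnd : '.' ∉ bs) :
    (as ++ '.' :: bs).splitOn '.' = as.splitOn '.' ++ [bs] := by
  induction as with
  | nil =>
    simp only [List.nil_append, List.splitOn, List.splitOnP_cons]
    simp [pvSplitOnPFree bs hnd, List.splitOnP_nil]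
  | cons a as ih =>
    simp only [List.cons_append, List.splitOn, List.splitOnP_cons] at ih ⊢
    by_cases ha : a = '.'
    · simp [ha, ih]
    · rw [if_neg (by simp [ha]), if_neg (by simp [ha]), ih]
      have hne := List.splitOnP_ne_nil (fun x => x == '.') as
      cases h : List.splitOnP (fun x => x == '.') as with
      | nil => exact absurd h hne
      | cons p ps => simp

-- PySem's Python split on a one-char separator is Mathlib's List.splitOn
theorem pvSplitOnGoEq (fuel : Nat) :
    ∀ (l cur : List Char) (accL : List (List Char)), l.length < fuel →
      PySem.Chars.splitOn.go ['.'] fuel l cur accL = accL.reverse ++ (l.splitOn '.').modifyHead (cur.reverse ++ ·) := by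
  induction fuel with
  | zero => intro l cur accL h; omega
  | succ n ih =>
    intro l cur accL h
    cases l with
    | nil => simp [PySem.Chars.splitOn.go, List.splitOn, List.splitOnP_nil]
    | cons c rest =>
      simp only [List.length_cons] at h
      simp only [PySem.Chars.splitOn.go]
      by_cases hc : c = '.'
      · rw [if_pos (by simp [hc, List.isPrefixOf])]
        rw [show (List.drop ['.'].length (c :: rest)) = rest by simp]
        rw [ih _ _ _ (by omega)]
        subst hc
        simp only [List.splitOn, List.splitOnP_cons, beq_self_eq_true, if_true]
        have hne := List.splitOnP_ne_nil (fun x => x == '.') rest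
        cases hr : List.splitOnP (fun x => x == '.') rest with
        | nil => exact absurd hr hne
        | cons p ps => simp
      · rw [if_neg (by simp [List.isPrefixOf]; exact fun hh => hc hh.symm)]
        rw [ih _ _ _ (by omega)]
        simp only [List.splitOn, List.splitOnP_cons]
        rw [if_neg (by simp [hc])]
        rw [List.modifyHead_modifyHead]
        have hne := List.splitOnP_ne_nil (fun x => x == '.') rest
        cases hr : List.splitOnP (fun x => x == '.') rest with
        | nil => exact absurd hr hne
        | cons p ps => simp

theorem pvSplitOnEq (cs : List Char) : PySem.Chars.splitOn cs ['.'] = cs.splitOn '.' := by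
  simp only [PySem.Chars.splitOn]
  rw [pvSplitOnGoEq _ _ _ _ (by omega)]
  have hne := List.splitOnP_ne_nil (fun x => x == '.') cs
  simp only [List.splitOn] at *
  cases h : List.splitOnP (fun x => x == '.') cs with
  | nil => exact absurd h hne
  | cons p ps => simp

-- the loop correspondence: A's while loop appends exactly B's joins of the
-- proper prefixes of the parts list, in the same order
theorem pvMain (n : Nat) : ∀ (cs : List Char) (acc : List String), cs.length ≤ n →
    pvAGo cs acc = acc ++ pvBGo (cs.splitOn '.').dropLast := by
  induction n with
  | zero =>
    intro cs acc h
    have : cs = [] := List.length_eq_zero_iff.mp (by omega)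
    subst this
    rw [pvAGo, pvBGo]
    simp [pvRfindNoDot [] (by simp), pvSplitOnNoDot [] (by simp)]
  | succ n ih =>
    intro cs acc h
    by_cases hm : '.' ∈ cs
    · obtain ⟨s, t, hrev, hns⟩ := List.eq_append_cons_of_mem (by simpa using hm : '.' ∈ cs.reverse)
      have hcs : cs = t.reverse ++ '.' :: s.reverse := by
        have := congrArg List.reverse hrev
        simpa using this
      have hnb : '.' ∉ s.reverse := by simpa using hns
      subst hcs
      rw [pvAGo]
      simp only [pvRfindLast _ _ hnb]
      rw [dif_pos (by positivity)]
      rw [PySem.List.slice_to _ (by positivity)]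
      simp only [Int.toNat_natCast, List.take_left]
      have hlen : t.reverse.length ≤ n := by
        simp only [List.length_append, List.length_cons] at h
        omega
      rw [ih _ _ hlen]
      rw [pvSplitOnLast _ _ hnb, List.dropLast_concat]
      conv_rhs => rw [pvBGo]
      rw [dif_neg (by simpa [List.splitOn] using List.splitOnP_ne_nil (fun x => x == '.') t.reverse)]
      have hj : PySem.Chars.join ['.'] (t.reverse.splitOn '.') = t.reverse := by
        simp only [PySem.Chars.join]
        exact List.intercalate_splitOn _ _
      rw [hj]
      simp
    · rw [pvAGo, dif_neg (by rw [pvRfindNoDot cs hm]; omega)]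
      rw [pvSplitOnNoDot cs hm]
      simp [pvBGo]

-- ===== VERDICT (by name: the statement is the Claim_ definition above) =====
theorem cmdstr_to_filter_list_spec : Claim_equal_cmdstr_to_filter_list := by
  intro cmd_str _
  unfold Spec_cmdstr_to_filter_list cmdstr_to_filter_list cmdstr_to_filter_list_alt
  simp only [pvSplitOnEq]
  rw [pvMain (PySem.Str.replace cmd_str "__" ".").toList.length _ _ le_rfl]
  conv_rhs => rw [pvBGo]
  rw [dif_neg (by simpa [List.splitOn] using
    List.splitOnP_ne_nil (fun x => x == '.') (PySem.Str.replace cmd_str "__" ".").toList)]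
  have hj : PySem.Chars.join ['.'] ((PySem.Str.replace cmd_str "__" ".").toList.splitOn '.')
      = (PySem.Str.replace cmd_str "__" ".").toList := by
    simp only [PySem.Chars.join]
    exact List.intercalate_splitOn _ _
  rw [hj]
  simp only [String.ofList_toList, List.cons_append, List.nil_append]
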